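-- pv_equiv track=rewrite | github.com/martinmladenov/advent-of-code-2020 | day20_part2.py | find_match_down
-- ===== SOURCE A (Python) =====
-- def rotate(tile):
--     return list(map(list, zip(*tile[::-1])))
--
-- def get_row(tile, row):
--     return tile[row]
--
-- def find_match_down(curr_id, curr_tile, tiles):
--     border = get_row(curr_tile, -1)
--     for other_id in tiles:
--         if other_id == curr_id:
--             continue
--         other = tiles[other_id]
--
--         for _ in range(4):
--             if get_row(other, 0) == border:
--                 return other_id, other
--             if get_row(other, 0) == border[::-1]:
--                 return other_id, list(map(lambda x: x[::-1], other))
--             other = rotate(other)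
--
--     return -1, None
-- ===== SOURCE B (Python) =====
-- def rotate(tile):
--     return list(map(list, zip(*tile[::-1])))
--
-- def find_match_down(curr_id, curr_tile, tiles):
--     border = curr_tile[-1]
--     rborder = border[::-1]
--     for other_id, other in tiles.items():
--         if other_id == curr_id:
--             continue
--         cols = list(zip(*other))  # transpose: cols[j] is column j, top to bottom
--         # the four borders, each O(s): top row, left column bottom-up,
--         # bottom row right-to-left, right column top-down
--         edges = [other[0],
--                  list(cols[0][::-1]),
--                  [c[-1] for c in cols][::-1],
--                  list(cols[-1])]
--         for r, e in enumerate(edges):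
--             if e == border or e == rborder:
--                 matched = other
--                 for _ in range(r):
--                     matched = rotate(matched)
--                 if e == border:
--                     return other_id, matched
--                 return other_id, [row[::-1] for row in matched]
--     return -1, None
-- ===== Notes on version B (the rewrite author's own statement) =====
-- stated objective: faster
-- what changed: Instead of rotating each candidate tile up to 4 times (each rotation rebuilds the whole grid via zip and list(map(list, ...))) and inspecting its top row, B transposes each candidate once and reads all four borders directly from the tile and its transpose, rotating only the single matching tile; Pre_ excludes curr_tile = [] (A raises IndexError), candidates that are empty or contain an empty row (B raises building the borders and A raises too unless a row-0 match hides it) and duplicate ids (an artefact of encoding the Python dict as a pair list).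
-- outside the precondition, e.g. on find_match_down(1, [['x']], {2: [['x'], []]}): A returns (2, [['x'], []]), B raises IndexError
import Mathlib
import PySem

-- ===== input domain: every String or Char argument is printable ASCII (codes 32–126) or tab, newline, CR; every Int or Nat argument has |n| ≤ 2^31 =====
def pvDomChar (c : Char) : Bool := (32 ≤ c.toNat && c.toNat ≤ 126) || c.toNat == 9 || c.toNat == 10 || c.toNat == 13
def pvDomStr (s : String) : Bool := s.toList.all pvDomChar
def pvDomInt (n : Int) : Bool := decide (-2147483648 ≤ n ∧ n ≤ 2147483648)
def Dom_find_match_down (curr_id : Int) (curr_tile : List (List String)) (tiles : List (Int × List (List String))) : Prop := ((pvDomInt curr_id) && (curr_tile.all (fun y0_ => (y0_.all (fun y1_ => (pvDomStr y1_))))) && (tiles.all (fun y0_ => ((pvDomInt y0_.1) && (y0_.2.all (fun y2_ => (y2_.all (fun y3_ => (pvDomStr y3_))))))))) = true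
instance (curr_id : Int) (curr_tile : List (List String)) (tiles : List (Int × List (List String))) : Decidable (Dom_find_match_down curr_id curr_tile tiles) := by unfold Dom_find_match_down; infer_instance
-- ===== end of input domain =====

-- B reads each candidate's four borders directly off the grid instead of rotating the
-- whole tile up to four times, and only rotates the single matching tile (objective: faster).

-- ===== PORT A =====
-- zip(*l): repeatedly take the heads while every list is nonempty (Python's zip truncates).
def pvZipStar (l : List (List String)) : List (List String) :=
  if h : l = [] ∨ l.any (fun r => r.isEmpty) then []
  else (l.map (fun r => r.headI)) :: pvZipStar (l.map (fun r => r.tail))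
termination_by l.headI.length
decreasing_by
  cases l with
  | nil => exact absurd (Or.inl rfl) h
  | cons a rest =>
    have ha : a ≠ [] := by
      intro hn
      exact h (Or.inr (by simp [hn]))
    simp only [List.attach_cons, List.map_cons, List.headI, List.length_tail]
    have := List.length_pos_of_ne_nil ha
    omega

-- rotate(tile) = list(map(list, zip(*tile[::-1]))); map(list, ·) is the identity here.
def pvRotate (t : List (List String)) : List (List String) := pvZipStar t.reverse

-- the 'for _ in range(4)' loop of A, fuel = remaining iterations.
-- get_row(x, 0) = x[0] is rendered as headI: exact whenever the tile is nonempty,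
-- which Pre_ guarantees at every reached call.
def pvTry4 (border : List String) (other : List (List String)) : Nat → Option (List (List String))
  | 0 => none
  | n + 1 =>
    if other.headI = border then some other
    else if other.headI = border.reverse then some (other.map List.reverse)
    else pvTry4 border (pvRotate other) n

-- the outer 'for other_id in tiles' loop.  Python iterates a dict; under Pre_'s
-- distinct-ids condition the dict's key order and lookup coincide with the pair list.
def pvFindA (curr_id : Int) (border : List String) : List (Int × List (List String)) → Int × Option (List (List String))
  | [] => (-1, none)
  | (oid, other) :: rest =>
    if oid = curr_id then pvFindA curr_id border rest
    else
      match pvTry4 border other 4 with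
      | some t => (oid, some t)
      | none => pvFindA curr_id border rest

-- curr_tile[-1] is rendered with a default: exact whenever curr_tile ≠ [] (Pre_).
def find_match_down (curr_id : Int) (curr_tile : List (List String)) (tiles : List (Int × List (List String))) : Int × Option (List (List String)) :=
  pvFindA curr_id (PySem.List.pyGetD curr_tile (-1) []) tiles

-- ===== PORT B =====
-- matched = rotate applied r times (Source B's 'for _ in range(r): matched = rotate(matched)').
def pvRotN (t : List (List String)) : Nat → List (List String)
  | 0 => t
  | n + 1 => pvRotN (pvRotate t) n

-- Source B's 'cols = list(zip(*other))' and its 'edges' list; cols[0]/other[0] → headI,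
-- cols[-1]/c[-1] → getLastD: exact on Pre_'s nonempty tiles with nonempty rows.
def pvEdges (other : List (List String)) : List (List String) :=
  let cols := pvZipStar other
  [other.headI,
   cols.headI.reverse,
   (cols.map (fun c => c.getLastD "")).reverse,
   cols.getLastD []]

-- Source B's inner 'for r, e in enumerate(edges)' loop.
def pvScanB (border rb : List String) (other : List (List String)) :
    List (Int × List String) → Option (List (List String))
  | [] => none
  | (r, e) :: rest =>
    if e = border ∨ e = rb then
      if e = border then some (pvRotN other r.toNat)
      else some ((pvRotN other r.toNat).map List.reverse)
    else pvScanB border rb other rest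

def pvFindB (curr_id : Int) (border rb : List String) : List (Int × List (List String)) → Int × Option (List (List String))
  | [] => (-1, none)
  | (oid, other) :: rest =>
    if oid = curr_id then pvFindB curr_id border rb rest
    else
      match pvScanB border rb other (PySem.List.enumerate (pvEdges other)) with
      | some t => (oid, some t)
      | none => pvFindB curr_id border rb rest

def find_match_down_alt (curr_id : Int) (curr_tile : List (List String)) (tiles : List (Int × List (List String))) : Int × Option (List (List String)) :=
  let border := PySem.List.pyGetD curr_tile (-1) []
  pvFindB curr_id border border.reverse tiles

-- ===== PRECONDITION & SPEC =====
-- Pre_ excludes: curr_tile = [] (A raises IndexError); candidate tiles that are empty or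
-- contain an empty row (building their borders raises IndexError in B, and A raises on
-- them too unless an earlier row-0 match hides it); and duplicate ids, an artefact of
-- encoding the Python dict as a pair list.
def Pre_find_match_down (curr_id : Int) (curr_tile : List (List String)) (tiles : List (Int × List (List String))) : Prop :=
  curr_tile ≠ [] ∧ (tiles.map Prod.fst).Nodup ∧
    ∀ p ∈ tiles, p.1 ≠ curr_id → (p.2 ≠ [] ∧ ∀ r ∈ p.2, r ≠ [])
instance (curr_id : Int) (curr_tile : List (List String)) (tiles : List (Int × List (List String))) : Decidable (Pre_find_match_down curr_id curr_tile tiles) := by unfold Pre_find_match_down; infer_instance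

def pvWitness_find_match_down : Int × List (List String) × (List (Int × List (List String))) :=
  (1, [["x"]], [(2, [["x"]]), (3, [["a", "b"], ["c", "d"]])])

def Spec_find_match_down (curr_id : Int) (curr_tile : List (List String)) (tiles : List (Int × List (List String))) (out : Int × Option (List (List String))) : Prop := out = find_match_down_alt curr_id curr_tile tiles
instance (curr_id : Int) (curr_tile : List (List String)) (tiles : List (Int × List (List String))) (out : Int × Option (List (List String))) : Decidable (Spec_find_match_down curr_id curr_tile tiles out) := by unfold Spec_find_match_down; infer_instance

-- ===== CLAIM (what is proved, stated in full; the proofs are below) =====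
def Claim_equal_find_match_down : Prop := ∀ (curr_id : Int) (curr_tile : List (List String)) (tiles : List (Int × List (List String))), Dom_find_match_down curr_id curr_tile tiles → Pre_find_match_down curr_id curr_tile tiles → Spec_find_match_down curr_id curr_tile tiles (find_match_down curr_id curr_tile tiles)

-- ===== LEMMAS AND PROOFS =====
-- a nonempty tile all of whose rows are nonempty (possibly ragged)
def pvRagOk (l : List (List String)) : Prop := l ≠ [] ∧ ∀ r ∈ l, r ≠ []

-- a rectangular tile: rows of the common positive width w
def pvRectW (w : Nat) (l : List (List String)) : Prop :=
  l ≠ [] ∧ 0 < w ∧ ∀ r ∈ l, r.length = w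

theorem pvRectW_ragOk {w : Nat} {l : List (List String)} (h : pvRectW w l) : pvRagOk l := by
  refine ⟨h.1, fun r hr hn => ?_⟩
  have hw := h.2.1
  have := h.2.2 r hr
  rw [hn] at this
  simp at this
  omega

def pvMinW (t : List (List String)) : Nat := ((t.map List.length).min?).getD 0

theorem pvMinW_spec {l : List (List String)} (h : l ≠ []) :
    (∃ r ∈ l, r.length = pvMinW l) ∧ ∀ r ∈ l, pvMinW l ≤ r.length := by
  have hne : l.map List.length ≠ [] := by simp [h]
  obtain ⟨x, xs, hx⟩ := List.exists_cons_of_ne_nil hne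
  have hsome : (l.map List.length).min? = some (xs.foldl min x) := by rw [hx]; rfl
  have hmin := List.min?_eq_some_iff'.mp hsome
  have hval : pvMinW l = xs.foldl min x := by unfold pvMinW; rw [hsome]; rfl
  constructor
  · obtain ⟨r, hr, hlen⟩ := List.mem_map.mp hmin.1
    exact ⟨r, hr, by rw [hlen, hval]⟩
  · intro r hr
    rw [hval]
    exact hmin.2 r.length (List.mem_map.mpr ⟨r, hr, rfl⟩)

theorem pvMinW_eq {l : List (List String)} (h : l ≠ []) {w : Nat}
    (h1 : ∃ r ∈ l, r.length = w) (h2 : ∀ r ∈ l, w ≤ r.length) : pvMinW l = w := by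
  obtain ⟨s1, s2⟩ := pvMinW_spec h
  obtain ⟨r, hr, hrw⟩ := h1
  obtain ⟨s, hs, hsw⟩ := s1
  have := s2 r hr
  have := h2 s hs
  omega

theorem pvMinW_pos {l : List (List String)} (h : pvRagOk l) : 1 ≤ pvMinW l := by
  obtain ⟨⟨r, hr, hrw⟩, _⟩ := pvMinW_spec h.1
  have := List.length_pos_of_ne_nil (h.2 r hr)
  omega

theorem pvMinW_reverse (l : List (List String)) : pvMinW l.reverse = pvMinW l := by
  rcases eq_or_ne l [] with rfl | h
  · rfl
  · obtain ⟨⟨r, hr, hrw⟩, s2⟩ := pvMinW_spec h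
    refine pvMinW_eq (by simp [h]) ⟨r, List.mem_reverse.mpr hr, hrw⟩ ?_
    intro s hs
    exact s2 s (List.mem_reverse.mp hs)

theorem pvMinW_tails {l : List (List String)} (h : l ≠ []) :
    pvMinW (l.map (fun r => r.tail)) = pvMinW l - 1 := by
  obtain ⟨⟨r, hr, hrw⟩, s2⟩ := pvMinW_spec h
  refine pvMinW_eq (by simp [h]) ⟨r.tail, List.mem_map.mpr ⟨r, hr, rfl⟩, by simp [hrw]⟩ ?_
  intro s hs
  obtain ⟨u, hu, rfl⟩ := List.mem_map.mp hs
  have := s2 u hu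
  simp only [List.length_tail]
  omega

theorem pvMinW_of_rect {w : Nat} {l : List (List String)} (h : pvRectW w l) :
    pvMinW l = w := by
  rcases List.exists_cons_of_ne_nil h.1 with ⟨a, rest, hl⟩
  exact pvMinW_eq h.1 ⟨a, by simp [hl], h.2.2 a (by simp [hl])⟩ (fun r hr => (h.2.2 r hr).ge)

theorem pvZipStar_eq {l : List (List String)} (h : pvRagOk l) :
    pvZipStar l = (l.map (fun r => r.headI)) :: pvZipStar (l.map (fun r => r.tail)) := by
  rw [pvZipStar, dif_neg]
  rintro (rfl | hany)
  · exact h.1 rfl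
  · obtain ⟨r, hr, he⟩ := List.any_eq_true.mp hany
    exact h.2 r hr (List.isEmpty_iff.mp he)

theorem pvRagOk_reverse {l : List (List String)} (h : pvRagOk l) : pvRagOk l.reverse :=
  ⟨by simp [h.1], fun r hr => h.2 r (List.mem_reverse.mp hr)⟩

theorem pvRagOk_tails {l : List (List String)} (h : pvRagOk l) (hw : 2 ≤ pvMinW l) :
    pvRagOk (l.map (fun r => r.tail)) := by
  refine ⟨by simp [h.1], ?_⟩
  intro r hr
  obtain ⟨s, hs, rfl⟩ := List.mem_map.mp hr
  have := (pvMinW_spec h.1).2 s hs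
  intro hn
  have := congrArg List.length hn
  simp only [List.length_tail, List.length_nil] at this
  omega

theorem pvZipStar_tails_nil {l : List (List String)} (h : pvRagOk l) (hw : pvMinW l = 1) :
    pvZipStar (l.map (fun r => r.tail)) = [] := by
  rw [pvZipStar, dif_pos]
  obtain ⟨⟨r, hr, hrw⟩, _⟩ := pvMinW_spec h.1
  right
  refine List.any_eq_true.mpr ⟨r.tail, List.mem_map.mpr ⟨r, hr, rfl⟩, ?_⟩
  rw [hw] at hrw
  simp [List.isEmpty_iff, List.eq_nil_of_length_eq_zero (by simp [hrw] : r.tail.length = 0)]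

theorem pv_headI_map_tail {l : List (List String)} (h : l ≠ []) :
    (l.map (fun r => r.tail)).headI = l.headI.tail := by
  rcases List.exists_cons_of_ne_nil h with ⟨a, rest, rfl⟩
  rfl

theorem pv_headI_mem {l : List (List String)} (h : l ≠ []) : l.headI ∈ l := by
  rcases List.exists_cons_of_ne_nil h with ⟨a, rest, rfl⟩
  simp [List.headI]

theorem pv_take_succ_of_ne_nil {a : List String} (h : a ≠ []) (k : Nat) :
    a.take (k + 1) = a.headI :: a.tail.take k := by
  rcases List.exists_cons_of_ne_nil h with ⟨x, xs, rfl⟩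
  rfl

theorem pv_getD_tail {r : List String} (h : r ≠ []) (k : Nat) (d : String) :
    r.tail.getD k d = r.getD (k + 1) d := by
  rcases List.exists_cons_of_ne_nil h with ⟨x, xs, rfl⟩
  rfl

theorem pv_headI_eq_getD_zero {r : List String} (h : r ≠ []) :
    r.headI = r.getD 0 "" := by
  rcases List.exists_cons_of_ne_nil h with ⟨x, xs, rfl⟩
  rfl

theorem pv_getLastD_irrel {l : List (List String)} (h : l ≠ []) (x : List String) :
    l.getLastD x = l.getLastD [] := by
  rcases List.exists_cons_of_ne_nil h with ⟨b, bs, rfl⟩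
  rw [List.getLastD_cons, List.getLastD_cons]

theorem pv_getLastD_mem {l : List (List String)} (h : l ≠ []) : l.getLastD [] ∈ l := by
  rw [List.getLastD_eq_getLast?, List.getLast?_eq_some_getLast h]
  simpa using List.getLast_mem h

-- shape of zip(*l): pvMinW l rows, each of length l.length (a rectangle)
theorem pvZipStar_shape {l : List (List String)} (h : pvRagOk l) :
    pvRectW l.length (pvZipStar l) ∧ (pvZipStar l).length = pvMinW l := by
  obtain ⟨w, hw⟩ : ∃ w, pvMinW l = w + 1 :=
    ⟨pvMinW l - 1, by have := pvMinW_pos h; omega⟩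
  induction w generalizing l with
  | zero =>
    rw [pvZipStar_eq h, pvZipStar_tails_nil h hw]
    exact ⟨⟨by simp, List.length_pos_of_ne_nil h.1, by intro r hr; simp only [List.mem_singleton] at hr; simp [hr]⟩, by simp [hw]⟩
  | succ w ih =>
    have ht : pvRagOk (l.map (fun r => r.tail)) := pvRagOk_tails h (by omega)
    have htw : pvMinW (l.map (fun r => r.tail)) = w + 1 := by
      rw [pvMinW_tails h.1]; omega
    have := ih ht htw
    rw [List.length_map] at this
    rw [pvZipStar_eq h]
    refine ⟨⟨by simp, List.length_pos_of_ne_nil h.1, ?_⟩, by simp [this.2, htw, hw]⟩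
    intro r hr
    simp only [List.mem_cons] at hr
    rcases hr with rfl | hr
    · simp
    · exact this.1.2.2 r hr

-- the heads of the rows of zip(*l) form l's first row, clipped to the width
theorem pvZipStar_map_headI {l : List (List String)} (h : pvRagOk l) :
    (pvZipStar l).map (fun r => r.headI) = l.headI.take (pvMinW l) := by
  obtain ⟨w, hw⟩ : ∃ w, pvMinW l = w + 1 :=
    ⟨pvMinW l - 1, by have := pvMinW_pos h; omega⟩
  rw [hw]
  induction w generalizing l with
  | zero =>
    rw [pvZipStar_eq h, pvZipStar_tails_nil h hw]
    have hhd : l.headI ≠ [] := h.2 _ (pv_headI_mem h.1)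
    rw [pv_take_succ_of_ne_nil hhd]
    rcases List.exists_cons_of_ne_nil h.1 with ⟨a, rest, rfl⟩
    simp [List.headI]
  | succ w ih =>
    have ht : pvRagOk (l.map (fun r => r.tail)) := pvRagOk_tails h (by omega)
    have htw : pvMinW (l.map (fun r => r.tail)) = w + 1 := by
      rw [pvMinW_tails h.1]; omega
    have hhd : l.headI ≠ [] := h.2 _ (pv_headI_mem h.1)
    rw [pvZipStar_eq h, List.map_cons, ih ht htw, pv_headI_map_tail h.1,
      pv_take_succ_of_ne_nil hhd]
    rcases List.exists_cons_of_ne_nil h.1 with ⟨a, rest, rfl⟩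
    rfl

-- the last row of zip(*l) is l's column at the width's last index
theorem pvZipStar_getLastD {l : List (List String)} (h : pvRagOk l) :
    (pvZipStar l).getLastD [] = l.map (fun r => r.getD (pvMinW l - 1) "") := by
  obtain ⟨w, hw⟩ : ∃ w, pvMinW l = w + 1 :=
    ⟨pvMinW l - 1, by have := pvMinW_pos h; omega⟩
  rw [hw]
  induction w generalizing l with
  | zero =>
    rw [pvZipStar_eq h, pvZipStar_tails_nil h hw]
    simp only [List.getLastD_cons, List.getLastD_nil, Nat.add_sub_cancel]
    exact List.map_congr_left fun r hr => pv_headI_eq_getD_zero (h.2 r hr)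
  | succ w ih =>
    have ht : pvRagOk (l.map (fun r => r.tail)) := pvRagOk_tails h (by omega)
    have htw : pvMinW (l.map (fun r => r.tail)) = w + 1 := by
      rw [pvMinW_tails h.1]; omega
    have hne : pvZipStar (l.map (fun r => r.tail)) ≠ [] := by
      rw [pvZipStar_eq ht]; simp
    rw [pvZipStar_eq h, List.getLastD_cons, pv_getLastD_irrel hne, ih ht htw, List.map_map]
    refine List.map_congr_left fun r hr => ?_
    have := pv_getD_tail (h.2 r hr) w ""
    simpa using this

theorem pv_headI_reverse (t : List (List String)) : t.reverse.headI = t.getLastD [] := by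
  cases ht : t.reverse with
  | nil =>
    have : t = [] := by simpa using congrArg List.reverse ht
    subst this; rfl
  | cons b bs =>
    have : t = bs.reverse ++ [b] := by
      have := congrArg List.reverse ht
      simpa using this
    subst this
    simp [List.headI, List.getLastD_eq_getLast?]

-- the tile after one rotation is a rectangle: pvMinW t rows of length t.length
theorem pvRotate_shape {t : List (List String)} (h : pvRagOk t) :
    pvRectW t.length (pvRotate t) ∧ (pvRotate t).length = pvMinW t := by
  have := pvZipStar_shape (pvRagOk_reverse h)
  rw [List.length_reverse, pvMinW_reverse] at this
  exact this

-- top border of the tile after 1, 2, 3 clockwise rotations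
theorem pvEdge1 {t : List (List String)} (h : pvRagOk t) :
    (pvRotate t).headI = t.reverse.map (fun r => r.headI) := by
  show (pvZipStar t.reverse).headI = _
  rw [pvZipStar_eq (pvRagOk_reverse h)]
  rfl

theorem pvEdge2 {t : List (List String)} (h : pvRagOk t) :
    (pvRotate (pvRotate t)).headI = ((t.getLastD []).take (pvMinW t)).reverse := by
  have h1 := pvRotate_shape h
  rw [pvEdge1 (pvRectW_ragOk h1.1), List.map_reverse]
  show (List.map (fun r => r.headI) (pvZipStar t.reverse)).reverse = _
  rw [pvZipStar_map_headI (pvRagOk_reverse h), pv_headI_reverse, pvMinW_reverse]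

theorem pvEdge3 {t : List (List String)} (h : pvRagOk t) :
    (pvRotate (pvRotate (pvRotate t))).headI = t.map (fun r => r.getD (pvMinW t - 1) "") := by
  have h1 := pvRotate_shape h
  have hrag1 : pvRagOk (pvRotate t) := pvRectW_ragOk h1.1
  have h2 := pvRotate_shape hrag1
  rw [pvEdge1 (pvRectW_ragOk h2.1), List.map_reverse]
  show (List.map (fun r => r.headI) (pvZipStar (pvRotate t).reverse)).reverse = _
  rw [pvZipStar_map_headI (pvRagOk_reverse hrag1), pv_headI_reverse, pvMinW_reverse,
    pvMinW_of_rect h1.1]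
  show (((pvZipStar t.reverse).getLastD []).take t.length).reverse = _
  rw [pvZipStar_getLastD (pvRagOk_reverse h), pvMinW_reverse]
  have hlen : (t.reverse.map (fun r => r.getD (pvMinW t - 1) "")).length = t.length := by
    simp
  rw [List.take_of_length_le (le_of_eq hlen), List.map_reverse, List.reverse_reverse]

theorem pv_getLastD_map {α β : Type} (f : α → β) {l : List α} (h : l ≠ []) (d : β) (d' : α) :
    (l.map f).getLastD d = f (l.getLastD d') := by
  rw [List.getLastD_eq_getLast?, List.getLastD_eq_getLast?, List.getLast?_map,
    List.getLast?_eq_some_getLast h]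
  rfl

-- the last elements of the rows of zip(*l) form l's last row, clipped to the width
theorem pvZipStar_map_getLastD {l : List (List String)} (h : pvRagOk l) :
    (pvZipStar l).map (fun c => c.getLastD "") = (l.getLastD []).take (pvMinW l) := by
  obtain ⟨w, hw⟩ : ∃ w, pvMinW l = w + 1 :=
    ⟨pvMinW l - 1, by have := pvMinW_pos h; omega⟩
  rw [hw]
  induction w generalizing l with
  | zero =>
    rw [pvZipStar_eq h, pvZipStar_tails_nil h hw]
    have hlr : l.getLastD [] ≠ [] := h.2 _ (pv_getLastD_mem h.1)
    rw [List.map_cons, List.map_nil, pv_getLastD_map _ (h.1) "" ([] : List String),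
      pv_take_succ_of_ne_nil hlr]
    simp
  | succ w ih =>
    have ht : pvRagOk (l.map (fun r => r.tail)) := pvRagOk_tails h (by omega)
    have htw : pvMinW (l.map (fun r => r.tail)) = w + 1 := by
      rw [pvMinW_tails h.1]; omega
    have hlr : l.getLastD [] ≠ [] := h.2 _ (pv_getLastD_mem h.1)
    rw [pvZipStar_eq h, List.map_cons, ih ht htw,
      pv_getLastD_map _ (h.1) "" ([] : List String),
      pv_getLastD_map _ (h.1) ([] : List String) ([] : List String),
      pv_take_succ_of_ne_nil hlr]

-- one step of A's inner loop, by rfl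
theorem pvTry4_step (border : List String) (other : List (List String)) (n : Nat) :
    pvTry4 border other (n + 1) =
      if other.headI = border then some other
      else if other.headI = border.reverse then some (other.map List.reverse)
      else pvTry4 border (pvRotate other) n := rfl

-- the unrolled 4-rotation check of A equals B's scan over the four edges, on a
-- nonempty tile with nonempty rows
theorem pvTry4_eq_scan (border : List String) {t : List (List String)}
    (h : pvRagOk t) :
    pvTry4 border t 4 = pvScanB border border.reverse t (PySem.List.enumerate (pvEdges t)) := by
  have e1 := pvEdge1 h
  have e2 := pvEdge2 h
  have e3 := pvEdge3 h
  have hcols1 : (pvZipStar t).headI.reverse = t.reverse.map (fun row => row.headI) := by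
    rw [pvZipStar_eq h]
    show (t.map (fun r => r.headI)).reverse = _
    rw [List.map_reverse]
  have hcols2 : ((pvZipStar t).map (fun c => c.getLastD "")).reverse =
      ((t.getLastD []).take (pvMinW t)).reverse := by
    rw [pvZipStar_map_getLastD h]
  have hcols3 : (pvZipStar t).getLastD [] = t.map (fun row => row.getD (pvMinW t - 1) "") :=
    pvZipStar_getLastD h
  have henum : PySem.List.enumerate (pvEdges t) =
      [(0, t.headI), (1, t.reverse.map (fun row => row.headI)),
       (2, ((t.getLastD []).take (pvMinW t)).reverse),
       (3, t.map (fun row => row.getD (pvMinW t - 1) ""))] := by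
    simp only [pvEdges, PySem.List.enumerate_cons, PySem.List.enumerate_nil,
      hcols1, hcols2, hcols3]
    norm_num
  rw [henum]
  show pvTry4 border t (3 + 1) =
    (if t.headI = border ∨ t.headI = border.reverse then
      if t.headI = border then some (pvRotN t (0 : Int).toNat)
      else some ((pvRotN t (0 : Int).toNat).map List.reverse)
    else if t.reverse.map (fun row => row.headI) = border ∨
        t.reverse.map (fun row => row.headI) = border.reverse then
      if t.reverse.map (fun row => row.headI) = border then some (pvRotN t (1 : Int).toNat)
      else some ((pvRotN t (1 : Int).toNat).map List.reverse)
    else if ((t.getLastD []).take (pvMinW t)).reverse = border ∨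
        ((t.getLastD []).take (pvMinW t)).reverse = border.reverse then
      if ((t.getLastD []).take (pvMinW t)).reverse = border then some (pvRotN t (2 : Int).toNat)
      else some ((pvRotN t (2 : Int).toNat).map List.reverse)
    else if t.map (fun row => row.getD (pvMinW t - 1) "") = border ∨
        t.map (fun row => row.getD (pvMinW t - 1) "") = border.reverse then
      if t.map (fun row => row.getD (pvMinW t - 1) "") = border then some (pvRotN t (3 : Int).toNat)
      else some ((pvRotN t (3 : Int).toNat).map List.reverse)
    else none)
  rw [← e1, ← e2, ← e3]
  rw [pvTry4_step]
  have hr0 : pvRotN t (0 : Int).toNat = t := rfl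
  have hr1 : pvRotN t (1 : Int).toNat = pvRotate t := rfl
  have hr2 : pvRotN t (2 : Int).toNat = pvRotate (pvRotate t) := rfl
  have hr3 : pvRotN t (3 : Int).toNat = pvRotate (pvRotate (pvRotate t)) := rfl
  by_cases c0 : t.headI = border
  · simp [c0, hr0, pvRotN]
  · by_cases c0' : t.headI = border.reverse
    · have hbr : ¬ border.reverse = border := fun hh => c0 (c0'.trans hh)
      simp [c0, c0', hbr, hr0, pvRotN]
    · simp only [c0, c0', or_self, if_false]
      rw [pvTry4_step]
      by_cases c1 : (pvRotate t).headI = border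
      · simp [c1, hr1, pvRotN]
      · by_cases c1' : (pvRotate t).headI = border.reverse
        · have hbr : ¬ border.reverse = border := fun hh => c1 (c1'.trans hh)
          simp [c1, c1', hbr, hr1, pvRotN]
        · simp only [c1, c1', or_self, if_false]
          rw [pvTry4_step]
          by_cases c2 : (pvRotate (pvRotate t)).headI = border
          · simp [c2, hr2, pvRotN]
          · by_cases c2' : (pvRotate (pvRotate t)).headI = border.reverse
            · have hbr : ¬ border.reverse = border := fun hh => c2 (c2'.trans hh)
              simp [c2, c2', hbr, hr2, pvRotN]
            · simp only [c2, c2', or_self, if_false]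
              rw [pvTry4_step]
              by_cases c3 : (pvRotate (pvRotate (pvRotate t))).headI = border
              · simp [c3, hr3, pvRotN]
              · by_cases c3' : (pvRotate (pvRotate (pvRotate t))).headI = border.reverse
                · have hbr : ¬ border.reverse = border := fun hh => c3 (c3'.trans hh)
                  simp [c3, c3', hbr, hr3, pvRotN]
                · simp [c3, c3', pvTry4]

theorem pvFindA_eq_findB (curr_id : Int) (border : List String)
    (tiles : List (Int × List (List String)))
    (h : ∀ p ∈ tiles, p.1 ≠ curr_id → (p.2 ≠ [] ∧ ∀ r ∈ p.2, r ≠ [])) :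
    pvFindA curr_id border tiles = pvFindB curr_id border border.reverse tiles := by
  induction tiles with
  | nil => rfl
  | cons p rest ih =>
    obtain ⟨oid, other⟩ := p
    simp only [pvFindA, pvFindB]
    have hrest := fun q hq => h q (List.mem_cons_of_mem _ hq)
    by_cases hc : oid = curr_id
    · simp [hc, ih hrest]
    · have hp : pvRagOk other := h (oid, other) (by simp) hc
      rw [pvTry4_eq_scan border hp]
      simp only [hc, if_false]
      cases pvScanB border border.reverse other (PySem.List.enumerate (pvEdges other)) with
      | none => simp [ih hrest]
      | some t => simp

-- ===== VERDICT (by name: the statement is the Claim_ definition above) =====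
theorem find_match_down_spec : Claim_equal_find_match_down := by
  intro curr_id curr_tile tiles _ hpre
  unfold Spec_find_match_down find_match_down find_match_down_alt
  exact pvFindA_eq_findB curr_id _ tiles hpre.2.2
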